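-- pv_equiv track=rewrite | github.com/a100472gabrielamarinho/ATP2022 | tpc6/obras.py | titporAno
-- ===== SOURCE A (Python) =====
-- def titporAno(obra):
--     dici = {}
--     for nome, _, ano, *_ in obra:
--         if ano in dici.keys():
--             dici[ano]= dici[ano] + [nome] #dici[ano].append(nome)
--         else:
--             dici[ano] = [nome]
--     return dici
-- ===== SOURCE B (Python) =====
-- def titporAno(obra):
--     anos = list(dict.fromkeys(ano for _, _, ano, *_ in obra))
--     return {ano: [nome for nome, _, a, *_ in obra if a == ano] for ano in anos}
-- ===== Notes on version B (the rewrite author's own statement) =====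
-- stated objective: alternative
-- what changed: Replaces the single-pass dict-accumulation (repeated membership test and list rebuild per row) by a two-phase scheme: first dedup the years in first-occurrence order (dict.fromkeys), then build each year's name list with one comprehension filtering the input.
import Mathlib
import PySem

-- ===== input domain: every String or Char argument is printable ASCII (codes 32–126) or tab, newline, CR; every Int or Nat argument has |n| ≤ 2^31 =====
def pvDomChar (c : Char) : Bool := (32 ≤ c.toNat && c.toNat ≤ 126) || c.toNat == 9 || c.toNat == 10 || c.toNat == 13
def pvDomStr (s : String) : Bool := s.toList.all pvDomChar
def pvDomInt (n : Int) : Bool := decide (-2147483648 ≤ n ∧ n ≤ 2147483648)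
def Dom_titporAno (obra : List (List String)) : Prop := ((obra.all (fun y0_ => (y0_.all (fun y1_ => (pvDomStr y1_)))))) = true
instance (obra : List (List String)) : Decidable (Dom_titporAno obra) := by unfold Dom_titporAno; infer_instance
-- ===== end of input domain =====

-- B groups by deduplicating the years first and then filtering the rows per year,
-- instead of A's incremental dict accumulation; the returned association lists agree
-- (keys in first-occurrence order).

-- row[0] (the `nome` of the unpacking) and row[2] (the `ano`); Pre_ guarantees 3 ≤ row.length
def pvNome (r : List String) : String := (PySem.List.pyGet? r 0).getD ""
def pvAno (r : List String) : String := (PySem.List.pyGet? r 2).getD ""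

-- ===== PORT A =====
def titporAno (obra : List (List String)) : List (String × List String) :=
  (obra.foldl (fun dici row =>
      let nome := pvNome row
      let ano := pvAno row
      if dici.contains ano then
        dici.insert ano (dici.getD ano [] ++ [nome])
      else
        dici.insert ano [nome])
    PySem.Dict.empty).items

-- ===== PORT B =====
def titporAno_alt (obra : List (List String)) : List (String × List String) :=
  let anos := PySem.List.dedup (obra.map (fun r => pvAno r))
  anos.map (fun ano =>
    (ano, (obra.filter (fun r => pvAno r == ano)).map (fun r => pvNome r)))

-- ===== PRECONDITION & SPEC =====
-- Pre_ excludes rows with fewer than 3 entries: the unpacking `nome, _, ano, *_` raises ValueError there (in both A and B).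
def Pre_titporAno (obra : List (List String)) : Prop := ∀ r ∈ obra, 3 ≤ r.length
instance (obra : List (List String)) : Decidable (Pre_titporAno obra) := by unfold Pre_titporAno; infer_instance
def pvWitness_titporAno : List (List String) :=
  [["a", "x", "2000"], ["b", "y", "1999"], ["c", "z", "2000", "extra"]]

def Spec_titporAno (obra : List (List String)) (out : List (String × List String)) : Prop := out = titporAno_alt obra
instance (obra : List (List String)) (out : List (String × List String)) : Decidable (Spec_titporAno obra out) := by unfold Spec_titporAno; infer_instance

-- ===== CLAIM (what is proved, stated in full; the proofs are below) =====
def Claim_equal_titporAno : Prop := ∀ (obra : List (List String)), Dom_titporAno obra → Pre_titporAno obra → Spec_titporAno obra (titporAno obra)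

-- ===== LEMMAS AND PROOFS =====

-- A's loop body is exactly `d.modify ano [] (· ++ [nome])`
theorem titporAno_step_eq_modify (d : PySem.Dict String (List String)) (ano nome : String) :
    (if d.contains ano then d.insert ano (d.getD ano [] ++ [nome]) else d.insert ano [nome])
      = d.modify ano [] (· ++ [nome]) := by
  unfold PySem.Dict.modify
  split_ifs with h
  · rfl
  · have h' : d.contains ano = false := by simpa using h
    rw [PySem.Dict.getD_of_not_contains d [] h']; rfl

-- the two ports agree on every input (the unpacking-failure rows are outside Pre_,
-- where both Pythons raise; the ports' value there is irrelevant)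
theorem titporAno_eq_alt (obra : List (List String)) :
    titporAno obra = titporAno_alt obra := by
  unfold titporAno titporAno_alt
  have hstep : (fun (dici : PySem.Dict String (List String)) row =>
      let nome := pvNome row
      let ano := pvAno row
      if dici.contains ano then
        dici.insert ano (dici.getD ano [] ++ [nome])
      else
        dici.insert ano [nome]) =
      (fun dici row => dici.modify (pvAno row) [] (· ++ [pvNome row])) := by
    funext d r
    exact titporAno_step_eq_modify d (pvAno r) (pvNome r)
  rw [hstep]
  have hmap : obra.foldl (fun dici row => dici.modify (pvAno row) [] (· ++ [pvNome row])) PySem.Dict.empty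
      = (obra.map (fun r => (pvAno r, pvNome r))).foldl (fun d p => d.modify p.1 [] (· ++ [p.2])) PySem.Dict.empty := by
    rw [List.foldl_map]
  rw [hmap]
  set pairs := obra.map (fun r => (pvAno r, pvNome r)) with hp
  have hnd : ((pairs.foldl (fun d p => d.modify p.1 [] (· ++ [p.2])) PySem.Dict.empty)).keys.Nodup :=
    PySem.Dict.nodup_keys_foldl_modify_key pairs Prod.fst [] (fun _ p => (· ++ [p.2])) PySem.Dict.empty (by simp)
  rw [PySem.Dict.items_eq_map_keys _ hnd []]
  have hkeys : (pairs.foldl (fun d p => d.modify p.1 [] (· ++ [p.2])) PySem.Dict.empty).keys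
      = PySem.List.dedup (obra.map (fun r => pvAno r)) := by
    rw [PySem.Dict.keys_foldl_modify_key]
    simp [hp, PySem.Set.update_nil_left, List.map_map, Function.comp_def]
  rw [hkeys]
  apply List.map_congr_left
  intro k hk
  rw [PySem.Dict.getD_foldl_modify_append]
  simp [hp, List.filter_map, List.map_map, Function.comp_def]

-- ===== VERDICT (by name: the statement is the Claim_ definition above) =====
theorem titporAno_spec : Claim_equal_titporAno := by
  intro obra _ _
  exact titporAno_eq_alt obra
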